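-- pv_equiv track=rewrite | github.com/sth7767-cpu/Treasure-hunt | normal.py | rotate_sprite_180
-- ===== SOURCE A (Python) =====
-- def rotate_sprite_180(sprite: str) -> str:
--     lines = sprite.split("\n")
--     if lines and lines[-1] == "":
--         lines.pop()
--
--     if not lines:
--         return sprite
--
--     w = max(len(line) for line in lines)
--     padded = [line.ljust(w) for line in lines]
--
--     rotated = []
--     for line in reversed(padded):
--         rotated.append(line[::-1])
--
--     return "\n".join(rotated)
-- ===== SOURCE B (Python) =====
-- def rotate_sprite_180(sprite: str) -> str:
--     # Single pass, no padding/reversal passes: each output row is built directly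
--     # by index arithmetic (out char j = in char w-1-j, or a space past the line's
--     # end), and rows are accumulated front-to-back by prepending, so the row
--     # order is reversed without iterating in reverse.
--     lines = sprite.split("\n")
--     if lines[-1] == "":
--         lines.pop()
--     if not lines:
--         return sprite
--     w = max(len(l) for l in lines)
--     out = ""
--     first = True
--     for line in lines:
--         row = "".join(line[w - 1 - j] if w - 1 - j < len(line) else " " for j in range(w))
--         out = row if first else row + "\n" + out
--         first = False
--     return out
-- ===== Notes on version B (the rewrite author's own statement) =====
-- stated objective: alternative
-- what changed: A's three staged passes (ljust-pad every line, iterate the padded lines in reverse reversing each with a slice, then join) are replaced by a single forward pass that builds each output row directly by index arithmetic (character j of a row is input character w-1-j, or a space past the line's end, so no padding or slice reversal exists) and reverses the row order by prepending each finished row to a string accumulator.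
import Mathlib
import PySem

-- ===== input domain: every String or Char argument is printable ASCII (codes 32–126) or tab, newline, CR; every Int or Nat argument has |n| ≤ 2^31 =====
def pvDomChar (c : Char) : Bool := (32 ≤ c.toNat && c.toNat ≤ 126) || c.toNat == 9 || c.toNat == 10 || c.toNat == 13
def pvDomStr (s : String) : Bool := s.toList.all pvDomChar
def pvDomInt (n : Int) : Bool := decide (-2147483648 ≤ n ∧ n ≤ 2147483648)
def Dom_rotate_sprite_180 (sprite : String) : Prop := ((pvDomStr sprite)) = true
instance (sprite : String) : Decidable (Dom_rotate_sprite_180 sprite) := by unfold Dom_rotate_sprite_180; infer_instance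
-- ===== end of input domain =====

-- B replaces A's pad-then-reverse-each-row-then-join pipeline by one pass that
-- builds each output row directly by index arithmetic and prepends it to an
-- accumulator; objective: alternative (same cost, different decomposition).

-- line.ljust(w): pad on the right with spaces to width w (exact: Python clamps a
-- negative pad count to 0, as .toNat does here). PySem has no ljust, ported by hand.
def pyLjust (s : String) (w : Int) : String :=
  String.ofList (s.toList ++ List.replicate (w - (s.toList.length : Int)).toNat ' ')

-- ===== PORT A =====
def rotate_sprite_180 (sprite : String) : String :=
  let lines := (PySem.Str.split? sprite "\n").getD []   -- sep ≠ "", so split? is some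
  let lines := if lines ≠ [] ∧ PySem.List.pyGet? lines (-1) = some "" then lines.dropLast else lines
  if lines = [] then sprite
  else
    let w := PySem.List.maxD (lines.map PySem.Str.len) id 0   -- max over a nonempty list
    let padded := lines.map (fun line => pyLjust line w)
    let rotated := padded.reverse.foldl
      (fun acc line => acc ++ [(PySem.Str.slice? line none none (-1)).getD ""]) []  -- line[::-1], step ≠ 0 so some
    PySem.Str.join "\n" rotated

-- ===== PORT B =====
-- '"".join(line[w-1-j] if w-1-j < len(line) else " " for j in range(w))':
-- the guard makes the index w-1-j in range, so getD's default is never used.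
def bRow (line : String) (w : Int) : String :=
  String.ofList ((PySem.List.pyRange 0 w 1).map
    (fun j => if w - 1 - j < PySem.Str.len line then (PySem.Str.pyGet? line (w - 1 - j)).getD ' ' else ' '))

def rotate_sprite_180_alt (sprite : String) : String :=
  let lines := (PySem.Str.split? sprite "\n").getD []   -- sep ≠ "", so split? is some
  let lines := if PySem.List.pyGet? lines (-1) = some "" then lines.dropLast else lines
  if lines = [] then sprite
  else
    let w := PySem.List.maxD (lines.map PySem.Str.len) id 0
    -- 'out = ""; first = True; for line in lines: out = row if first else row+"\n"+out'
    let res := lines.foldl (fun (st : String × Bool) line =>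
        let row := bRow line w
        ((if st.2 then row else row ++ "\n" ++ st.1), false)) ("", true)
    res.1

-- ===== PRECONDITION & SPEC =====
def Spec_rotate_sprite_180 (sprite : String) (out : String) : Prop := out = rotate_sprite_180_alt sprite
instance (sprite : String) (out : String) : Decidable (Spec_rotate_sprite_180 sprite out) := by unfold Spec_rotate_sprite_180; infer_instance

-- ===== CLAIM (what is proved, stated in full; the proofs are below) =====
def Claim_equal_rotate_sprite_180 : Prop := ∀ (sprite : String), Dom_rotate_sprite_180 sprite → Spec_rotate_sprite_180 sprite (rotate_sprite_180 sprite)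

-- ===== LEMMAS AND PROOFS =====

-- the two pop-guards agree: pyGet? l (-1) = some "" already forces l ≠ []
lemma guard_eq (l : List String) :
    (if l ≠ [] ∧ PySem.List.pyGet? l (-1) = some "" then l.dropLast else l)
      = (if PySem.List.pyGet? l (-1) = some "" then l.dropLast else l) := by
  by_cases h : PySem.List.pyGet? l (-1) = some ""
  · have hne : l ≠ [] := by rintro rfl; simp [PySem.List.pyGet?] at h
    simp [h, hne]
  · simp [h]

-- merging the separator into the last piece does not change a join
lemma chars_join_split (sep u v : List Char) :
    ∀ (xs : List (List Char)),
      PySem.Chars.join sep (xs ++ [u ++ sep ++ v]) = PySem.Chars.join sep (xs ++ [u, v])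
  | [] => by
      simp [PySem.Chars.join_singleton, PySem.Chars.join_cons_cons, List.append_assoc]
  | x :: xs => by
      have ih := chars_join_split sep u v xs
      cases xs with
      | nil =>
          simp [PySem.Chars.join_singleton, PySem.Chars.join_cons_cons, List.append_assoc]
      | cons y ys =>
          simp only [List.cons_append, PySem.Chars.join_cons_cons] at *
          rw [ih]

lemma str_join_split (xs : List String) (u v : String) :
    PySem.Str.join "\n" (xs ++ [u ++ "\n" ++ v]) = PySem.Str.join "\n" (xs ++ [u, v]) := by
  apply String.toList_inj.mp
  rw [PySem.Str.toList_join, PySem.Str.toList_join]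
  simp only [List.map_append, List.map_cons, List.map_nil, String.toList_append]
  exact chars_join_split "\n".toList u.toList v.toList (xs.map String.toList)

-- the B loop after the first iteration: an accumulator-prepending fold is a join
lemma foldB_false (w : Int) :
    ∀ (l : List String) (s : String),
      (l.foldl (fun (st : String × Bool) line =>
          let row := bRow line w
          ((if st.2 = true then row else row ++ "\n" ++ st.1), false)) (s, false)).1
        = PySem.Str.join "\n" ((l.map (fun line => bRow line w)).reverse ++ [s])
  | [], s => by
      apply String.toList_inj.mp
      rw [PySem.Str.toList_join]
      simp [PySem.Chars.join_singleton]
  | a :: t, s => by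
      have ih := foldB_false w t (bRow a w ++ "\n" ++ s)
      simp only [List.foldl_cons, List.map_cons, List.reverse_cons,
        Bool.false_eq_true, if_false] at *
      rw [ih, str_join_split]
      simp [List.append_assoc]

-- each B row is the reverse of the corresponding padded A row
lemma rowEq (line : String) (w : Int) (h : PySem.Str.len line ≤ w) :
    bRow line w = String.ofList (pyLjust line w).toList.reverse := by
  unfold bRow pyLjust
  apply String.toList_inj.mp
  simp only [String.toList_ofList]
  rw [PySem.Str.len_eq] at h
  have h0 : (0:Int) ≤ (line.toList.length : Int) := by positivity
  have hw0 : (0:Int) ≤ w := le_trans h0 h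
  have hL : (line.toList ++ List.replicate (w - (line.toList.length:Int)).toNat ' ').length
      = w.toNat := by
    simp only [List.length_append, List.length_replicate]; omega
  rw [PySem.List.pyRange_one]
  apply List.ext_getElem
  · simp only [List.length_map, List.length_range, List.length_reverse, hL]
    omega
  · intro i h1 h2
    have hiW : i < w.toNat := by
      simp only [List.length_map, List.length_range] at h1
      omega
    simp only [List.getElem_map, List.getElem_range, List.getElem_reverse]
    have harg : w - 1 - (0 + (i:Int)) = ((w.toNat - 1 - i : Nat) : Int) := by omega
    rw [harg, PySem.Str.len_eq, PySem.Str.pyGet?_natCast]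
    by_cases hc : w.toNat - 1 - i < line.toList.length
    · rw [if_pos (by exact_mod_cast hc)]
      rw [List.getElem?_eq_getElem hc, Option.getD_some]
      rw [List.getElem_append (h := by omega)]
      rw [dif_pos (by omega)]
      have hidx : (line.toList ++ List.replicate (w - (line.toList.length:Int)).toNat ' ').length
          - 1 - i = w.toNat - 1 - i := by omega
      simp only [hidx]
    · rw [if_neg (by omega)]
      rw [List.getElem_append (h := by omega)]
      rw [dif_neg (by omega)]
      simp

-- every line's length is bounded by the computed maximum
lemma len_le_maxD (lines : List String) (l : String) (hl : l ∈ lines) :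
    PySem.Str.len l ≤ PySem.List.maxD (lines.map PySem.Str.len) id 0 := by
  cases hmax : PySem.List.max? (lines.map PySem.Str.len) id with
  | none =>
      rw [PySem.List.max?_eq_none_iff] at hmax
      exact absurd (List.mem_map_of_mem hl) (by rw [hmax]; simp)
  | some m =>
      have hb := PySem.List.max?_isMax hmax (PySem.Str.len l) (List.mem_map_of_mem hl)
      unfold PySem.List.maxD
      rw [hmax]
      simpa using hb

-- ===== VERDICT (by name: the statement is the Claim_ definition above) =====
theorem rotate_sprite_180_spec : Claim_equal_rotate_sprite_180 := by
  intro sprite _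
  unfold Spec_rotate_sprite_180 rotate_sprite_180 rotate_sprite_180_alt
  simp only [guard_eq]
  set lines := (if PySem.List.pyGet? ((PySem.Str.split? sprite "\n").getD []) (-1) = some ""
      then ((PySem.Str.split? sprite "\n").getD []).dropLast
      else (PySem.Str.split? sprite "\n").getD []) with hlines
  clear_value lines
  by_cases hne : lines = []
  · simp [hne]
  · simp only [if_neg hne]
    set w := PySem.List.maxD (lines.map PySem.Str.len) id 0 with hw
    have hbound := fun l hl => len_le_maxD lines l hl
    rw [← hw] at hbound
    clear_value w
    obtain ⟨a, t, rfl⟩ := List.exists_cons_of_ne_nil hne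
    -- A's side: the append loop is a map, each slice is a reverse
    rw [PySem.List.foldl_append_singleton_eq_map, List.nil_append, List.map_reverse]
    have hA : ((a :: t).map (fun line => pyLjust line w)).map
          (fun line => (PySem.Str.slice? line none none (-1)).getD "")
        = (a :: t).map (fun line => bRow line w) := by
      rw [List.map_map]
      apply List.map_congr_left
      intro l hl
      rw [Function.comp, PySem.Str.slice?_none_none_neg_one, Option.getD_some]
      exact (rowEq l w (hbound l hl)).symm
    rw [hA]
    -- B's side: first iteration then the prepending fold
    simp only [List.foldl_cons, List.map_cons, List.reverse_cons]
    rw [foldB_false]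
    simp
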